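-- pv_equiv track=rewrite | github.com/aurea-soriano/ColorAssignment | initial_main.py | categorize_sumfo_value
-- ===== SOURCE A (Python) =====
-- def categorize_sumfo_value(vector):
--
--     ''' 1-excellent, 2-good, 3-regular, 4-bad, 5-really bad'''
--     result_values = []
--     for i in range(0, len(vector)):
--         if 70 <= vector[i]:
--             result_values.append(0)
--         elif 65 <= vector[i] < 70:
--             result_values.append(1)
--         elif 60 <= vector[i] < 65:
--             result_values.append(2)
--         elif 55 <= vector[i] < 60:
--             result_values.append(3)
--         else:
--             result_values.append(4)
--     return result_values
-- ===== SOURCE B (Python) =====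
-- _BOUNDARIES = (55, 60, 65, 70)
--
-- def categorize_sumfo_value(vector):
--     ''' 1-excellent, 2-good, 3-regular, 4-bad, 5-really bad'''
--     return [4 - sum(1 for b in _BOUNDARIES if b <= v) for v in vector]
-- ===== Notes on version B (the rewrite author's own statement) =====
-- stated objective: idiomatic
-- what changed: Replaces the indexed loop with an if/elif threshold cascade by a single comprehension that computes each bucket arithmetically as 4 minus the count of boundary values (55,60,65,70) not exceeding the element.
import Mathlib
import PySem

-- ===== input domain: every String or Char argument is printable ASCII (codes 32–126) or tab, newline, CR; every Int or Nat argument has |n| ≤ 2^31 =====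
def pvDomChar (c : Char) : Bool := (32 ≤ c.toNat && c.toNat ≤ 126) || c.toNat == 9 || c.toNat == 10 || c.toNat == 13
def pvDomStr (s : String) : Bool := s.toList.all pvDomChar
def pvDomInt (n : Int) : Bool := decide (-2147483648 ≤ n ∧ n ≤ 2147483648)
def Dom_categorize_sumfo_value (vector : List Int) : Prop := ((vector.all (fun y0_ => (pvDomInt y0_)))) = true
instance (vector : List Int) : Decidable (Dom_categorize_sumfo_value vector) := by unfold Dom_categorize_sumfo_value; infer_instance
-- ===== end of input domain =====

-- B replaces A's indexed loop with an if/elif cascade by a per-element arithmetic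
-- bucket: 4 minus the count of boundaries (55,60,65,70) that are ≤ the value (idiomatic, same cost).

-- ===== PORT A =====
-- the for-loop over range(0, len(vector)) appending per the if/elif cascade;
-- vector[i] is ported with pyGetD (the index i is always in range here, so exact)
def categorize_sumfo_value (vector : List Int) : List Int :=
  (PySem.List.pyRange 0 vector.length 1).foldl
    (fun result_values i =>
      let v := PySem.List.pyGetD vector i 0
      if 70 ≤ v then result_values ++ [0]
      else if 65 ≤ v ∧ v < 70 then result_values ++ [1]
      else if 60 ≤ v ∧ v < 65 then result_values ++ [2]
      else if 55 ≤ v ∧ v < 60 then result_values ++ [3]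
      else result_values ++ [4]) []

-- ===== PORT B =====
def pvBoundaries : List Int := [55, 60, 65, 70]

-- the comprehension: 4 - sum(1 for b in _BOUNDARIES if b <= v) per element
def categorize_sumfo_value_alt (vector : List Int) : List Int :=
  vector.map (fun v =>
    4 - pvBoundaries.foldl (fun acc b => if b ≤ v then acc + 1 else acc) 0)

-- ===== PRECONDITION & SPEC =====
def Spec_categorize_sumfo_value (vector : List Int) (out : List Int) : Prop := out = categorize_sumfo_value_alt vector
instance (vector : List Int) (out : List Int) : Decidable (Spec_categorize_sumfo_value vector out) := by unfold Spec_categorize_sumfo_value; infer_instance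

-- ===== CLAIM (what is proved, stated in full; the proofs are below) =====
def Claim_equal_categorize_sumfo_value : Prop := ∀ (vector : List Int), Dom_categorize_sumfo_value vector → Spec_categorize_sumfo_value vector (categorize_sumfo_value vector)

-- ===== LEMMAS AND PROOFS =====

-- A's per-element bucket (as it appears in the port's loop body)
def pvBucketA (v : Int) : Int :=
  if 70 ≤ v then 0
  else if 65 ≤ v ∧ v < 70 then 1
  else if 60 ≤ v ∧ v < 65 then 2
  else if 55 ≤ v ∧ v < 60 then 3
  else 4

theorem pvBucket_eq (v : Int) :
    pvBucketA v = 4 - pvBoundaries.foldl (fun acc b => if b ≤ v then acc + 1 else acc) 0 := by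
  unfold pvBucketA pvBoundaries
  simp only [List.foldl]
  split_ifs <;> omega

theorem categorize_sumfo_value_eq_map (vector : List Int) :
    categorize_sumfo_value vector = vector.map pvBucketA := by
  unfold categorize_sumfo_value
  have h : (fun (result_values : List Int) (i : Int) =>
      let v := PySem.List.pyGetD vector i 0
      if 70 ≤ v then result_values ++ [(0 : Int)]
      else if 65 ≤ v ∧ v < 70 then result_values ++ [1]
      else if 60 ≤ v ∧ v < 65 then result_values ++ [2]
      else if 55 ≤ v ∧ v < 60 then result_values ++ [3]
      else result_values ++ [4]) = fun acc i => acc ++ [pvBucketA (PySem.List.pyGetD vector i 0)] := by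
    funext acc i; unfold pvBucketA; dsimp only; split_ifs <;> rfl
  rw [h, PySem.List.foldl_append_singleton_eq_map]
  simp only [List.nil_append]
  show List.map (pvBucketA ∘ fun i => PySem.List.pyGetD vector i 0) _ = _
  rw [← List.map_map]
  have hm := PySem.List.map_pyGetD_pyRange_zero (xs := vector) (d := (0 : Int))
  simp only [PySem.List.len] at hm
  rw [hm]

-- ===== VERDICT (by name: the statement is the Claim_ definition above) =====
theorem categorize_sumfo_value_spec : Claim_equal_categorize_sumfo_value := by
  intro vector _
  unfold Spec_categorize_sumfo_value categorize_sumfo_value_alt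
  rw [categorize_sumfo_value_eq_map]
  exact List.map_congr_left (fun v _ => pvBucket_eq v)
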